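-- pv_equiv track=rewrite | github.com/Rohanpatel4/COSC410-2025-AutoGrader | backend/app/services/judge0/test_splitter.py | collect_import_lines
-- ===== SOURCE A (Python) =====
-- from typing import List
--
-- def collect_import_lines(lines: List[str]) -> List[str]:
--     """
--     Extract import statements from the beginning of the test file.
--     These will be prepended to each test unit.
--     """
--     imports: List[str] = []
--     for line in lines:
--         s = line.strip()
--         # Skip empty lines
--         if not s:
--             continue
--         # Collect import lines
--         if s.startswith("import ") or s.startswith("from "):
--             imports.append(line)
--         else:
--             # Assume imports are grouped at the top; break on first non-import
--             break
--     return imports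
-- ===== SOURCE B (Python) =====
-- from typing import List
--
-- def collect_import_lines(lines: List[str]) -> List[str]:
--     # Staged approach: first locate the cut position (index of the first
--     # non-blank line that is not an import), then slice the prefix and
--     # drop blank lines from it.
--     cut = len(lines)
--     for i, line in enumerate(lines):
--         s = line.strip()
--         if s and not (s.startswith("import ") or s.startswith("from ")):
--             cut = i
--             break
--     return [line for line in lines[:cut] if line.strip()]
-- ===== Notes on version B (the rewrite author's own statement) =====
-- stated objective: alternative
-- what changed: Instead of one accumulator loop with continue/append/break, B first computes an index boundary (the position of the first non-blank non-import line), then slices the prefix up to it and filters out blank lines in a second pass.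
import Mathlib
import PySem

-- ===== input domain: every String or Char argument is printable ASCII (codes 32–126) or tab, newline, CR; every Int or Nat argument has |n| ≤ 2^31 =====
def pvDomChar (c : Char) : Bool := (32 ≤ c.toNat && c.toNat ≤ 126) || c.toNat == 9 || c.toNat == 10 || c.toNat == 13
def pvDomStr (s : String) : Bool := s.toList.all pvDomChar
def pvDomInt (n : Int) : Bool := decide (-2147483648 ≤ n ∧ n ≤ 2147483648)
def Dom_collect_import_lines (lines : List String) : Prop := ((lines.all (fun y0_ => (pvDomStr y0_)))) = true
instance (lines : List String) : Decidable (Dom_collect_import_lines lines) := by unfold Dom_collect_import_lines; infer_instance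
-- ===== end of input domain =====

-- B replaces A's accumulator loop (continue/append/break) by a staged computation:
-- find the cut index of the first non-blank non-import line, slice the prefix, filter blanks.


-- ===== PORT A =====
-- literal transliteration of A's loop: 'continue' on blank, append on import, 'break' returns the accumulator
def collectA_go (imports : List String) : List String → List String
  | [] => imports
  | line :: rest =>
    let s := PySem.Str.strip line
    if s = "" then collectA_go imports rest
    else if PySem.Str.startswith s "import " || PySem.Str.startswith s "from " then
      collectA_go (imports ++ [line]) rest
    else imports

def collect_import_lines (lines : List String) : List String :=
  collectA_go [] lines

-- ===== PORT B =====
-- Source B's boundary scan: returns the index of the first non-blank non-import line, else len(lines)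
def collectB_cut (i : Nat) : List String → Nat
  | [] => i
  | line :: rest =>
    let s := PySem.Str.strip line
    if s ≠ "" ∧ ¬(PySem.Str.startswith s "import " || PySem.Str.startswith s "from ") = true then i
    else collectB_cut (i + 1) rest

def collect_import_lines_alt (lines : List String) : List String :=
  (lines.take (collectB_cut 0 lines)).filter (fun line => PySem.Str.strip line ≠ "")

-- ===== PRECONDITION & SPEC =====
def Spec_collect_import_lines (lines : List String) (out : List String) : Prop := out = collect_import_lines_alt lines
instance (lines : List String) (out : List String) : Decidable (Spec_collect_import_lines lines out) := by unfold Spec_collect_import_lines; infer_instance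

-- ===== CLAIM (what is proved, stated in full; the proofs are below) =====
def Claim_equal_collect_import_lines : Prop := ∀ (lines : List String), Dom_collect_import_lines lines → Spec_collect_import_lines lines (collect_import_lines lines)

-- ===== LEMMAS AND PROOFS =====

theorem collectB_cut_shift (lines : List String) : ∀ (i : Nat),
    collectB_cut i lines = i + collectB_cut 0 lines := by
  induction lines with
  | nil => intro i; simp [collectB_cut]
  | cons line rest ih =>
    intro i
    simp only [collectB_cut]
    split_ifs with h
    · omega
    · rw [ih (i + 1), ih 1]; omega

theorem collectA_go_eq (lines : List String) : ∀ (acc : List String),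
    collectA_go acc lines = acc ++ collect_import_lines_alt lines := by
  induction lines with
  | nil => intro acc; simp [collectA_go, collect_import_lines_alt, collectB_cut]
  | cons line rest ih =>
    intro acc
    by_cases hb : PySem.Str.strip line = ""
    · have hcut : collectB_cut 0 (line :: rest) = 1 + collectB_cut 0 rest := by
        simp only [collectB_cut]
        rw [if_neg (fun h => h.1 hb), collectB_cut_shift]
      have hB : collect_import_lines_alt (line :: rest) = collect_import_lines_alt rest := by
        simp only [collect_import_lines_alt, hcut, Nat.add_comm 1, List.take_succ_cons,
          List.filter_cons]
        rw [if_neg (by simp [hb])]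
      have hA : collectA_go acc (line :: rest) = collectA_go acc rest := by
        simp only [collectA_go]
        rw [if_pos hb]
      rw [hA, hB, ih]
    · by_cases hi : (PySem.Str.startswith (PySem.Str.strip line) "import "
              || PySem.Str.startswith (PySem.Str.strip line) "from ") = true
      · have hcut : collectB_cut 0 (line :: rest) = 1 + collectB_cut 0 rest := by
          simp only [collectB_cut]
          rw [if_neg (fun h => h.2 hi), collectB_cut_shift]
        have hB : collect_import_lines_alt (line :: rest) = line :: collect_import_lines_alt rest := by
          simp only [collect_import_lines_alt, hcut, Nat.add_comm 1, List.take_succ_cons,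
            List.filter_cons]
          rw [if_pos (by simp [hb])]
        have hA : collectA_go acc (line :: rest) = collectA_go (acc ++ [line]) rest := by
          simp only [collectA_go]
          rw [if_neg hb, if_pos hi]
        rw [hA, hB, ih]; simp
      · have hcut : collectB_cut 0 (line :: rest) = 0 := by
          simp only [collectB_cut]
          rw [if_pos ⟨hb, hi⟩]
        have hB : collect_import_lines_alt (line :: rest) = [] := by
          simp [collect_import_lines_alt, hcut]
        have hA : collectA_go acc (line :: rest) = acc := by
          simp only [collectA_go]
          rw [if_neg hb, if_neg hi]
        rw [hA, hB]; simp

-- ===== VERDICT (by name: the statement is the Claim_ definition above) =====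
theorem collect_import_lines_spec : Claim_equal_collect_import_lines := by
  intro lines _
  unfold Spec_collect_import_lines collect_import_lines
  simpa using collectA_go_eq lines []
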